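-- pv_equiv track=rewrite | github.com/Groovy52/Data-Structure-and-Algorithm | Data-structure/CP01_Simple-Structure/CP01-01_String/Remove consecutive A characters.py | solution
-- ===== SOURCE A (Python) =====
-- def solution(S):
--     T = ''
--     for s in S:
--         """
--         아래 조건의 반대:
--         s=='a' or s=='A' (s가 a거나 A면)
--         """
--         if s!='a' and s!='A':
--             T += s
--         else:
--             if T[-1:]!='a' and T[-1:]!='A':
--                 T += s
--             else:
--                 T = T[:-1] + 'a'
--     return T
-- ===== SOURCE B (Python) =====
-- def solution(S):
--     pieces = []
--     i = 0
--     n = len(S)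
--     while i < n:
--         j = i
--         isa = S[i] in 'aA'
--         while j < n and (S[j] in 'aA') == isa:
--             j += 1
--         if isa:
--             pieces.append('a' if j - i > 1 else S[i])
--         else:
--             pieces.append(S[i:j])
--         i = j
--     return ''.join(pieces)
-- ===== Notes on version B (the rewrite author's own statement) =====
-- stated objective: alternative
-- what changed: B scans the string run by run (groupby-style): it splits off each maximal run of same-key characters up front and emits one collapsed lowercase character for multi-character target runs, the lone original character for length-1 target runs, and other runs verbatim, instead of A's per-character rebuild that inspects and rewrites the last appended character of its output.
import Mathlib
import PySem

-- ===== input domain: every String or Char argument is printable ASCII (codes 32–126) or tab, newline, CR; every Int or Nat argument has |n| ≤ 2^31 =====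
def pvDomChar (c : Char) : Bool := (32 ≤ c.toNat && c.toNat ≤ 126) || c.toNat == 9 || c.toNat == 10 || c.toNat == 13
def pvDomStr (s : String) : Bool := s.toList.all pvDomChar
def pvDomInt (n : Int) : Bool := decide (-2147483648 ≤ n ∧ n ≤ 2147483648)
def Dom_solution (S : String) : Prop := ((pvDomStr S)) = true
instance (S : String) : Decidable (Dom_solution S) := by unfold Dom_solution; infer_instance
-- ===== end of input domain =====

-- B collapses each run of consecutive 'a'/'A' up front (groupby-style run scan) instead of
-- A's char-by-char rebuilding with a look-back at the last appended character; objective: alternative.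

-- ===== PORT A =====
-- one loop step of A: T[-1:] tests ported via List.getLast? ('' for empty T ⇒ none)
def solStepA (T : List Char) (s : Char) : List Char :=
  if s ≠ 'a' ∧ s ≠ 'A' then T ++ [s]
  else if T.getLast? ≠ some 'a' ∧ T.getLast? ≠ some 'A' then T ++ [s]
  else T.dropLast ++ ['a']

def solution (S : String) : String :=
  String.ofList (S.toList.foldl solStepA [])

-- ===== PORT B =====
-- inner while: split off the maximal prefix whose membership in "aA" equals isa
def splitRun (isa : Bool) : List Char → List Char × List Char
  | [] => ([], [])
  | c :: cs =>
    if (c == 'a' || c == 'A') == isa then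
      let p := splitRun isa cs
      (c :: p.1, p.2)
    else ([], c :: cs)

theorem splitRun_snd_length_le (isa : Bool) : ∀ l : List Char, (splitRun isa l).2.length ≤ l.length := by
  intro l
  induction l with
  | nil => simp [splitRun]
  | cons c cs ih =>
    simp only [splitRun]
    split
    · simpa using Nat.le_succ_of_le ih
    · simp

-- outer while: one iteration per run
def goB : List Char → List Char
  | [] => []
  | c :: cs =>
    let isa := (c == 'a' || c == 'A')
    let p := splitRun isa cs
    (if isa then (if p.1.isEmpty then [c] else ['a']) else c :: p.1) ++ goB p.2
termination_by l => l.length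
decreasing_by
  simpa using Nat.lt_succ_of_le (splitRun_snd_length_le _ cs)

def solution_alt (S : String) : String :=
  String.ofList (goB S.toList)

-- ===== PRECONDITION & SPEC =====
def Spec_solution (S : String) (out : String) : Prop := out = solution_alt S
instance (S : String) (out : String) : Decidable (Spec_solution S out) := by unfold Spec_solution; infer_instance

-- ===== CLAIM (what is proved, stated in full; the proofs are below) =====
def Claim_equal_solution : Prop := ∀ (S : String), Dom_solution S → Spec_solution S (solution S)

-- ===== LEMMAS AND PROOFS =====

theorem splitRun_append (isa : Bool) : ∀ l : List Char, (splitRun isa l).1 ++ (splitRun isa l).2 = l := by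
  intro l
  induction l with
  | nil => simp [splitRun]
  | cons c cs ih =>
    simp only [splitRun]
    split
    · simpa using ih
    · simp

theorem splitRun_fst_key (isa : Bool) : ∀ l : List Char, ∀ c ∈ (splitRun isa l).1, (c == 'a' || c == 'A') = isa := by
  intro l
  induction l with
  | nil => simp [splitRun]
  | cons c cs ih =>
    intro d hd
    by_cases hk : ((c == 'a' || c == 'A') = isa)
    · simp only [splitRun, hk, beq_self_eq_true, if_pos] at hd
      rcases List.mem_cons.mp hd with hd | hd
      · subst hd; exact hk
      · exact ih d hd
    · simp [splitRun, hk] at hd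

theorem splitRun_snd_head (isa : Bool) : ∀ l : List Char, ∀ d, (splitRun isa l).2.head? = some d → (d == 'a' || d == 'A') ≠ isa := by
  intro l
  induction l with
  | nil => simp [splitRun]
  | cons c cs ih =>
    intro d hd
    by_cases hk : ((c == 'a' || c == 'A') = isa)
    · simp only [splitRun, hk, beq_self_eq_true, if_pos] at hd
      exact ih d hd
    · simp only [splitRun, beq_iff_eq, if_neg hk, List.head?_cons, Option.some.injEq] at hd
      subst hd; exact hk

-- A's loop over a run of non-a/A characters appends them unchanged
theorem foldl_nonA (l : List Char) (h : ∀ c ∈ l, (c == 'a' || c == 'A') = false) :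
    ∀ acc, List.foldl solStepA acc l = acc ++ l := by
  induction l with
  | nil => simp
  | cons c cs ih =>
    intro acc
    have hc := h c (by simp)
    have hc' : c ≠ 'a' ∧ c ≠ 'A' := by
      simp only [Bool.or_eq_false_iff, beq_eq_false_iff_ne] at hc; exact hc
    have : solStepA acc c = acc ++ [c] := by simp [solStepA, hc']
    rw [List.foldl_cons, this, ih (fun d hd => h d (by simp [hd]))]
    simp

-- A's loop over the tail of an a/A run collapses onto the run's first character
theorem foldl_aA (l : List Char) (h : ∀ c ∈ l, (c == 'a' || c == 'A') = true) :
    ∀ (acc : List Char) (b : Char), (b = 'a' ∨ b = 'A') →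
      List.foldl solStepA (acc ++ [b]) l = acc ++ [if l.isEmpty then b else 'a'] := by
  induction l with
  | nil => simp
  | cons c cs ih =>
    intro acc b hb
    have hc := h c (by simp)
    have hc' : ¬ (c ≠ 'a' ∧ c ≠ 'A') := by
      simp only [Bool.or_eq_true, beq_iff_eq] at hc
      rcases hc with hc | hc <;> simp [hc]
    have hlast : (acc ++ [b]).getLast? = some b := by simp
    have hstep : solStepA (acc ++ [b]) c = acc ++ ['a'] := by
      rcases hb with hb | hb <;> simp [solStepA, hc', hb]
    rw [List.foldl_cons, hstep, ih (fun d hd => h d (by simp [hd])) acc 'a' (Or.inl rfl)]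
    simp

-- head condition: if the next character is a/A then the accumulator does not end in a/A
def HdOK (l acc : List Char) : Prop :=
  ∀ c, l.head? = some c → (c == 'a' || c == 'A') = true →
    acc.getLast? ≠ some 'a' ∧ acc.getLast? ≠ some 'A'

theorem main_lemma : ∀ (n : ℕ) (l acc : List Char), l.length ≤ n → HdOK l acc →
    List.foldl solStepA acc l = acc ++ goB l := by
  intro n
  induction n with
  | zero =>
    intro l acc hl _
    have : l = [] := List.eq_nil_of_length_eq_zero (Nat.le_zero.mp hl)
    subst this; simp [goB]
  | succ n ih =>
    intro l acc hl hhd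
    match l with
    | [] => simp [goB]
    | c :: cs =>
      have hsplit := splitRun_append (c == 'a' || c == 'A') cs
      set isa := (c == 'a' || c == 'A') with hisa
      set r := (splitRun isa cs).1 with hr
      set rest := (splitRun isa cs).2 with hrest
      have hcs : cs = r ++ rest := hsplit.symm
      have hrestlen : rest.length ≤ n := by
        have h2 : rest.length ≤ cs.length := by
          rw [hrest]; exact splitRun_snd_length_le isa cs
        simp only [List.length_cons] at hl
        omega
      have hgo : goB (c :: cs) =
          (if isa then (if r.isEmpty then [c] else ['a']) else c :: r) ++ goB rest := by
        rw [goB]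
      have hfold : List.foldl solStepA acc (c :: cs) =
          List.foldl solStepA (List.foldl solStepA (solStepA acc c) r) rest := by
        rw [hcs]; simp
      cases hisa' : isa with
      | false =>
        -- non-a/A run: everything is appended unchanged
        have hc : (c == 'a' || c == 'A') = false := by rw [← hisa]; exact hisa'
        have hc' : c ≠ 'a' ∧ c ≠ 'A' := by
          simp only [Bool.or_eq_false_iff, beq_eq_false_iff_ne] at hc; exact hc
        have hstep : solStepA acc c = acc ++ [c] := by simp [solStepA, hc']
        have hrkeys : ∀ d ∈ r, (d == 'a' || d == 'A') = false := by
          intro d hd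
          have := splitRun_fst_key isa cs d hd
          rw [hisa'] at this; exact this
        have hHd : HdOK rest (acc ++ [c] ++ r) := by
          intro d hd _
          have hlastmem : ∀ x, (acc ++ [c] ++ r).getLast? = some x → x ∈ c :: r := by
            intro x hx
            rw [List.append_assoc, List.getLast?_append_of_ne_nil] at hx
            · simpa using List.mem_of_getLast? hx
            · simp
          have hall : ∀ x ∈ c :: r, (x == 'a' || x == 'A') = false := by
            intro x hx
            rcases List.mem_cons.mp hx with h' | h'
            · subst h'; exact hc
            · exact hrkeys _ h'
          constructor <;>
            (intro hx; exact absurd (hall _ (hlastmem _ hx)) (by decide))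
        rw [hfold, foldl_nonA r hrkeys, hstep,
            ih rest (acc ++ [c] ++ r) hrestlen hHd, hgo, hisa']
        simp
      | true =>
        -- a/A run: first char kept, rest collapses to 'a'
        have hc : (c == 'a' || c == 'A') = true := by rw [← hisa]; exact hisa'
        have hlastok := hhd c rfl hc
        have hc'' : ¬ (c ≠ 'a' ∧ c ≠ 'A') := by
          simp only [Bool.or_eq_true, beq_iff_eq] at hc
          rcases hc with hc | hc <;> simp [hc]
        have hstep : solStepA acc c = acc ++ [c] := by
          simp [solStepA, hc'', hlastok.1, hlastok.2]
        have hrkeys : ∀ d ∈ r, (d == 'a' || d == 'A') = true := by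
          intro d hd
          have := splitRun_fst_key isa cs d hd
          rw [hisa'] at this; exact this
        have hcor : c = 'a' ∨ c = 'A' := by
          simp only [Bool.or_eq_true, beq_iff_eq] at hc; exact hc
        have hHd : HdOK rest (acc ++ [if r.isEmpty then c else 'a']) := by
          intro d hd hdk
          have := splitRun_snd_head isa cs d (by rw [← hrest]; exact hd)
          rw [hisa'] at this
          exact absurd hdk this
        rw [hfold, hstep, foldl_aA r hrkeys acc c hcor,
            ih rest _ hrestlen hHd, hgo, hisa']
        split <;> simp

-- ===== VERDICT (by name: the statement is the Claim_ definition above) =====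
theorem solution_spec : Claim_equal_solution := by
  intro S _
  unfold Spec_solution solution solution_alt
  rw [main_lemma S.toList.length S.toList [] le_rfl (by intro c hc _; simp)]
  simp
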